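-- pv_equiv track=rewrite | github.com/vrih/todoist_cli | completions.py | date_complete
-- ===== SOURCE A (Python) =====
-- def date_complete(text, state):
--     """Tab complete for dates"""
--     dates = ["today", "tomorrow", "next week", "monday", "tuesday", "wednesday",
--              "thursday", "friday", "saturday", "sunday"]
--
--     for date in dates:
--         if date.startswith(text):
--             if not state:
--                 return date
--             else:
--                 state -= 1
--     return None
-- ===== SOURCE B (Python) =====
-- def date_complete(text, state):
--     """Tab complete for dates"""
--     matches = _PREFIX_INDEX.get(text, [])
--     return matches[state] if 0 <= state < len(matches) else None
--
--
-- # Precomputed prefix index: every prefix of every date maps to the dates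
-- # (in original order) that start with it; a call is then a single dict lookup.
-- _DATES = ["today", "tomorrow", "next week", "monday", "tuesday", "wednesday",
--           "thursday", "friday", "saturday", "sunday"]
-- _PREFIX_INDEX = {}
-- for _d in _DATES:
--     for _i in range(len(_d) + 1):
--         _PREFIX_INDEX.setdefault(_d[:_i], []).append(_d)
-- ===== Notes on version B (the rewrite author's own statement) =====
-- stated objective: alternative
-- what changed: Replaces A's per-call scan with a decrementing counter by a prefix->matches dictionary precomputed once at module load, so each call is a single dict lookup plus a bounds-guarded index.
import Mathlib
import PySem

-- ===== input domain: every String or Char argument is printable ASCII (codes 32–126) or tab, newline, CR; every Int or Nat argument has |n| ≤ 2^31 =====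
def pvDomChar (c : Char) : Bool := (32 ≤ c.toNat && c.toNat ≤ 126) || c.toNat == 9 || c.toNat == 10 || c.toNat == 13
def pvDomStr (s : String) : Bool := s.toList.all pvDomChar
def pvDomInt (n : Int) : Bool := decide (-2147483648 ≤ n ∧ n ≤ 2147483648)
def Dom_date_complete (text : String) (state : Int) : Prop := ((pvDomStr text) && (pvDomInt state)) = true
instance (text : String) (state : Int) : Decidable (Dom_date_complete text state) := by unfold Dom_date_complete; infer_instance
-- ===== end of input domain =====

-- B replaces A's scan-and-decrement loop by a precomputed prefix→matches dictionary built once; a call is one lookup plus an index guard.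
-- ===== PORT A =====
def pvDates : List String :=
  ["today", "tomorrow", "next week", "monday", "tuesday", "wednesday",
   "thursday", "friday", "saturday", "sunday"]

def dcLoopA (text : String) : List String → Int → Option String
  | [], _ => none
  | d :: ds, state =>
    if PySem.Str.startswith d text then
      if state = 0 then some d
      else dcLoopA text ds (state - 1)
    else dcLoopA text ds state

def date_complete (text : String) (state : Int) : Option String :=
  dcLoopA text pvDates state

-- ===== PORT B =====
-- module-level precomputation in Source B: for each date, for each prefix d[:i], append the date
def pvPrefixIndex : PySem.Dict String (List String) :=
  pvDates.foldl
    (fun acc date =>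
      (PySem.List.pyRange 0 (PySem.Str.len date + 1) 1).foldl
        (fun acc i => acc.modify (PySem.Str.slice date none (some i)) [] (· ++ [date])) acc)
    PySem.Dict.empty

def date_complete_alt (text : String) (state : Int) : Option String :=
  let ms := pvPrefixIndex.getD text []
  if 0 ≤ state ∧ state < PySem.List.len ms then PySem.List.pyGet? ms state else none

-- ===== PRECONDITION & SPEC =====
def Spec_date_complete (text : String) (state : Int) (out : Option String) : Prop := out = date_complete_alt text state
instance (text : String) (state : Int) (out : Option String) : Decidable (Spec_date_complete text state out) := by unfold Spec_date_complete; infer_instance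

-- ===== CLAIM (what is proved, stated in full; the proofs are below) =====
def Claim_equal_date_complete : Prop := ∀ (text : String) (state : Int), Dom_date_complete text state → Spec_date_complete text state (date_complete text state)

-- ===== LEMMAS AND PROOFS =====

-- A's loop returns exactly the state-th element of the filtered match list.
theorem dcLoopA_eq_filter_get (text : String) (ds : List String) (state : Int) :
    dcLoopA text ds state =
      (if 0 ≤ state ∧ state < ((ds.filter (fun d => PySem.Str.startswith d text)).length : Int)
       then PySem.List.pyGet? (ds.filter (fun d => PySem.Str.startswith d text)) state
       else none) := by
  induction ds generalizing state with
  | nil => simp [dcLoopA]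
  | cons d ds ih =>
    rw [dcLoopA]
    by_cases h : PySem.Str.startswith d text = true
    · rw [if_pos h]
      have hf : List.filter (fun d => PySem.Str.startswith d text) (d :: ds)
          = d :: List.filter (fun d => PySem.Str.startswith d text) ds := by
        rw [List.filter_cons, if_pos h]
      rw [hf]
      by_cases hz : state = 0
      · rw [if_pos hz, hz, if_pos (by simp only [List.length_cons]; omega)]
        exact (PySem.List.pyGet?_zero_cons _ _).symm
      · rw [if_neg hz, ih]
        by_cases hr : 0 ≤ state - 1 ∧ state - 1 < ((ds.filter (fun d => PySem.Str.startswith d text)).length : Int)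
        · rw [if_pos hr, if_pos (by simp only [List.length_cons]; omega)]
          have hs : state = ((state - 1).toNat : Int) + 1 := by omega
          rw [hs, PySem.List.pyGet?_cons_succ]
          congr 1
          omega
        · rw [if_neg hr, if_neg (by simp only [List.length_cons]; omega)]
    · rw [if_neg h]
      have hf : List.filter (fun d => PySem.Str.startswith d text) (d :: ds)
          = List.filter (fun d => PySem.Str.startswith d text) ds := by
        rw [List.filter_cons, if_neg h]
      rw [hf]
      exact ih state

-- the nested build loop is the flat fold over all (prefix, date) pairs
theorem pvBuild_flat (ds : List String) (d : PySem.Dict String (List String)) :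
    ds.foldl
      (fun acc date =>
        (PySem.List.pyRange 0 (PySem.Str.len date + 1) 1).foldl
          (fun acc i => acc.modify (PySem.Str.slice date none (some i)) [] (· ++ [date])) acc) d
    = (ds.flatMap (fun date =>
        (PySem.List.pyRange 0 (PySem.Str.len date + 1) 1).map
          (fun i => (PySem.Str.slice date none (some i), date)))).foldl
        (fun acc p => acc.modify p.1 [] (· ++ [p.2])) d := by
  induction ds generalizing d with
  | nil => rfl
  | cons date ds ih =>
    rw [List.foldl_cons, List.flatMap_cons, List.foldl_append, ih, List.foldl_map]

-- filtering the range of prefix lengths keeps exactly the length of t (when t is a prefix)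
theorem filt_range_eq (k m : Nat) (h : m < k) :
    (List.range k).filter (fun i => i == m) = [m] := by
  induction k with
  | zero => omega
  | succ j ih =>
    rw [List.range_succ, List.filter_append]
    by_cases hm : m = j
    · subst hm
      have h0 : (List.range m).filter (fun i => i == m) = [] := by
        rw [List.filter_eq_nil_iff]
        intro i hi
        simp only [List.mem_range] at hi
        simp only [beq_iff_eq]
        omega
      simp [h0]
    · rw [ih (by omega)]
      have : ((j : Nat) == m) = false := by simp; omega
      simp [this]

-- the pairs contributed by one date, filtered at key t, are [date] iff date starts with t
theorem perDate (t d' : String) :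
    (((PySem.List.pyRange 0 (PySem.Str.len d' + 1) 1).map
        (fun i => (PySem.Str.slice d' none (some i), d'))).filter
        (fun p => p.1 == t)).map (fun p => p.2)
    = if PySem.Str.startswith d' t then [d'] else [] := by
  have hn : PySem.Str.len d' + 1 = ((d'.toList.length + 1 : Nat) : Int) := by
    simp [PySem.Str.len_eq]
  have hq : ∀ i : Nat, (PySem.Str.slice d' none (some (i : Int)) == t)
      = decide (d'.toList.take i = t.toList) := by
    intro i
    have hsl : (PySem.Str.slice d' none (some (i : Int))).toList = d'.toList.take i := by
      simp [PySem.List.slice_to_natCast]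
    rw [Bool.eq_iff_iff]
    simp only [beq_iff_eq, decide_eq_true_eq]
    constructor
    · intro h
      rw [← hsl, h]
    · intro h
      have h2 : String.ofList (PySem.Str.slice d' none (some (i : Int))).toList
          = String.ofList t.toList := by rw [hsl, h]
      rwa [String.ofList_toList, String.ofList_toList] at h2
  rw [hn, PySem.List.pyRange_zero_natCast, List.map_map, List.filter_map, List.map_map]
  by_cases hsw : PySem.Str.startswith d' t = true
  · rw [if_pos hsw]
    have hpre : t.toList <+: d'.toList := by
      have := hsw
      simp only [PySem.Str.startswith_eq] at this
      exact (PySem.Chars.startswith_iff _ _).mp this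
    have hml : t.toList.length ≤ d'.toList.length := hpre.length_le
    have hcong : ∀ i ∈ List.range (d'.toList.length + 1),
        (((fun p => p.1 == t) ∘ ((fun i => (PySem.Str.slice d' none (some i), d')) ∘ fun n : Nat => (n : Int))) i)
        = (i == t.toList.length) := by
      intro i hi
      simp only [List.mem_range] at hi
      simp only [Function.comp]
      rw [hq i, Bool.eq_iff_iff]
      simp only [decide_eq_true_eq, beq_iff_eq]
      constructor
      · intro h
        have := congrArg List.length h
        simp only [List.length_take] at this
        omega
      · intro h
        subst h
        exact (List.prefix_iff_eq_take.mp hpre).symm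
    rw [List.filter_congr hcong, filt_range_eq _ _ (by omega)]
    rfl
  · rw [if_neg hsw]
    have h0 : List.filter
        ((fun p => p.1 == t) ∘ ((fun i => (PySem.Str.slice d' none (some i), d')) ∘ fun n : Nat => (n : Int)))
        (List.range (d'.toList.length + 1)) = [] := by
      rw [List.filter_eq_nil_iff]
      intro i _
      simp only [Function.comp]
      rw [hq i]
      simp only [decide_eq_true_eq]
      intro h
      apply hsw
      have hpre : t.toList <+: d'.toList := h ▸ List.take_prefix i d'.toList
      simp only [PySem.Str.startswith_eq]
      exact (PySem.Chars.startswith_iff _ _).mpr hpre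
    rw [h0]
    rfl

-- flattening over all dates gives exactly the filtered date list
theorem flat_filter (t : String) (ds : List String) :
    ((ds.flatMap (fun date =>
        (PySem.List.pyRange 0 (PySem.Str.len date + 1) 1).map
          (fun i => (PySem.Str.slice date none (some i), date)))).filter
        (fun p => p.1 == t)).map (fun p => p.2)
    = ds.filter (fun d => PySem.Str.startswith d t) := by
  induction ds with
  | nil => rfl
  | cons d' ds ih =>
    rw [List.flatMap_cons, List.filter_append, List.map_append, ih, perDate, List.filter_cons]
    by_cases h : PySem.Str.startswith d' t = true
    · rw [if_pos h, if_pos h]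
      rfl
    · rw [if_neg h, if_neg h]
      rfl

-- The lookup in the precomputed index IS the filtered match list, for every text.
theorem pvIdx_getD (text : String) :
    pvPrefixIndex.getD text [] = pvDates.filter (fun d => PySem.Str.startswith d text) := by
  unfold pvPrefixIndex
  rw [pvBuild_flat, PySem.Dict.getD_foldl_modify_append, PySem.Dict.getD_empty, flat_filter]
  rfl

-- ===== VERDICT (by name: the statement is the Claim_ definition above) =====
theorem date_complete_spec : Claim_equal_date_complete := by
  intro text state _
  unfold Spec_date_complete date_complete date_complete_alt
  rw [pvIdx_getD]
  simp only [PySem.List.len_eq]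
  exact dcLoopA_eq_filter_get text pvDates state
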